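-- pv_equiv track=rewrite | github.com/WowCZ/shadowgnn | src/utils.py | get_reprocess_col_table_dict
-- ===== SOURCE A (Python) =====
-- def get_reprocess_col_table_dict(tab_cols, tab_ids):
--     table_dict = {}
--     for cor_id, cor_val in enumerate(tab_cols):
--         table_dict[tab_ids[cor_id]] = table_dict.get(tab_ids[cor_id], []) + [cor_id]
--
--     col_table_dict = {}
--     for key_item, value_item in table_dict.items():
--         for value in value_item:
--             col_table_dict[value] = col_table_dict.get(value, []) + [key_item]
--     col_table_dict[0] = [x for x in range(len(table_dict) - 1)]
--     return col_table_dict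
-- ===== SOURCE B (Python) =====
-- def get_reprocess_col_table_dict(tab_cols, tab_ids):
--     n = len(tab_cols)
--     distinct = list(dict.fromkeys(tab_ids[:n]))
--     out = {i: [t] for t in distinct for i in range(n) if tab_ids[i] == t}
--     out[0] = list(range(len(distinct) - 1))
--     return out
-- ===== Notes on version B (the rewrite author's own statement) =====
-- stated objective: simpler
-- what changed: A's two dict-accumulation passes (group column indices by table id, then invert that grouping with get()+list-concatenation) are replaced by a direct construction: dedup the table-id prefix once with dict.fromkeys and emit each column's singleton [table_id] entry straight from a comprehension, then apply the same key-0 override.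
import Mathlib
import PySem

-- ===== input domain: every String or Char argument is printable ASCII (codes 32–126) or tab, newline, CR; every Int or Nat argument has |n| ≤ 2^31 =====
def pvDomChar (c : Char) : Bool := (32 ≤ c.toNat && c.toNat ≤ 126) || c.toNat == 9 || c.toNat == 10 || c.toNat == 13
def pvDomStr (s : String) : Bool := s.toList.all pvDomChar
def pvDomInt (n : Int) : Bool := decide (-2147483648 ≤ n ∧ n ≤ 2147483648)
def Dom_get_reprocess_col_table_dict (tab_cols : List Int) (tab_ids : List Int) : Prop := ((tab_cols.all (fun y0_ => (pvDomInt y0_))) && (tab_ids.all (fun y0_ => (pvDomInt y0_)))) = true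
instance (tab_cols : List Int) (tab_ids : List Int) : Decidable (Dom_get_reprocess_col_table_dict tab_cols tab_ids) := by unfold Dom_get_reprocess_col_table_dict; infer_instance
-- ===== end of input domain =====

-- B replaces A's two dict-accumulation passes (group columns by table, then invert) by a direct
-- construction: dedup the table-id prefix once and emit each column's singleton entry straight away
-- (objective: simpler; same results, including insertion order).

-- ===== PORT A =====
def get_reprocess_col_table_dict (tab_cols : List Int) (tab_ids : List Int) : List (Int × List Int) :=
  let table_dict :=
    (PySem.List.enumerate tab_cols).foldl
      (fun d p =>
        d.insert (PySem.List.pyGetD tab_ids p.1 0)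
          (d.getD (PySem.List.pyGetD tab_ids p.1 0) [] ++ [p.1]))
      (PySem.Dict.empty : PySem.Dict Int (List Int))
  let col_table_dict :=
    table_dict.items.foldl
      (fun d q => q.2.foldl (fun d v => d.insert v (d.getD v [] ++ [q.1])) d)
      (PySem.Dict.empty : PySem.Dict Int (List Int))
  (col_table_dict.insert 0 (PySem.List.pyRange 0 ((table_dict.size : Int) - 1) 1)).items

-- ===== PORT B =====
def get_reprocess_col_table_dict_alt (tab_cols : List Int) (tab_ids : List Int) : List (Int × List Int) :=
  let n : Int := PySem.List.len tab_cols
  let distinct := PySem.List.dedup (PySem.List.slice tab_ids none (some n))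
  let out :=
    (distinct.flatMap (fun t =>
        ((PySem.List.pyRange 0 n 1).filter (fun i => PySem.List.pyGetD tab_ids i 0 == t)).map
          (fun i => (i, [t])))).foldl
      (fun d p => d.insert p.1 p.2) (PySem.Dict.empty : PySem.Dict Int (List Int))
  (out.insert 0 (PySem.List.pyRange 0 (PySem.List.len distinct - 1) 1)).items

-- ===== PRECONDITION & SPEC =====
-- A indexes tab_ids[cor_id] for every position of tab_cols: it raises IndexError when
-- tab_ids is shorter than tab_cols; exactly those inputs are excluded.
def Pre_get_reprocess_col_table_dict (tab_cols : List Int) (tab_ids : List Int) : Prop :=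
  tab_cols.length ≤ tab_ids.length
instance (tab_cols : List Int) (tab_ids : List Int) : Decidable (Pre_get_reprocess_col_table_dict tab_cols tab_ids) := by unfold Pre_get_reprocess_col_table_dict; infer_instance

def pvWitness_get_reprocess_col_table_dict : List Int × List Int := ([10, 20, 30], [5, 7, 5])

def Spec_get_reprocess_col_table_dict (tab_cols : List Int) (tab_ids : List Int) (out : List (Int × List Int)) : Prop := out = get_reprocess_col_table_dict_alt tab_cols tab_ids
instance (tab_cols : List Int) (tab_ids : List Int) (out : List (Int × List Int)) : Decidable (Spec_get_reprocess_col_table_dict tab_cols tab_ids out) := by unfold Spec_get_reprocess_col_table_dict; infer_instance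

-- ===== CLAIM (what is proved, stated in full; the proofs are below) =====
def Claim_equal_get_reprocess_col_table_dict : Prop := ∀ (tab_cols : List Int) (tab_ids : List Int), Dom_get_reprocess_col_table_dict tab_cols tab_ids → Pre_get_reprocess_col_table_dict tab_cols tab_ids → Spec_get_reprocess_col_table_dict tab_cols tab_ids (get_reprocess_col_table_dict tab_cols tab_ids)

-- ===== LEMMAS AND PROOFS =====

-- the id of column i (total form of tab_ids[i], used under the precondition)
def pvIds (tab_ids : List Int) (i : Int) : Int := PySem.List.pyGetD tab_ids i 0
-- the (table id, column index) pairs in column order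
def pvPl (tab_ids : List Int) (n : Nat) : List (Int × Int) :=
  (List.range n).map (fun (k : Nat) => (pvIds tab_ids k, (k : Int)))
-- the distinct table ids, in first-occurrence order
def pvD (tab_ids : List Int) (n : Nat) : List Int :=
  PySem.Set.ofList ((pvPl tab_ids n).map (·.1))
-- the columns of table t, in order
def pvGrp (tab_ids : List Int) (n : Nat) (t : Int) : List Int :=
  ((pvPl tab_ids n).filter (·.1 == t)).map (·.2)
-- the (column, table id) pairs, grouped by table
def pvFl (tab_ids : List Int) (n : Nat) : List (Int × Int) :=
  (pvD tab_ids n).flatMap (fun t => (pvGrp tab_ids n t).map (fun v => (v, t)))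

theorem pv_enum_map {α β : Type} (xs : List α) (s : Int) (f : Int → β) :
    (PySem.List.enumerate xs s).map (fun p => f p.1) =
      (List.range xs.length).map (fun (k : Nat) => f (s + k)) := by
  induction xs generalizing s with
  | nil => simp [PySem.List.enumerate]
  | cons x t ih =>
      show f s :: (PySem.List.enumerate t (s + 1)).map (fun p => f p.1) = _
      rw [ih]
      simp only [List.length_cons, List.range_succ_eq_map, List.map_cons, List.map_map]
      refine congrArg₂ _ (by simp) (List.map_congr_left fun k _ => ?_)
      show f (s + 1 + (k : Int)) = f (s + ((k + 1 : Nat) : Int))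
      congr 1
      push_cast
      ring

theorem pv_nested_flatten (L : List (Int × List Int)) (init : PySem.Dict Int (List Int)) :
    L.foldl (fun d q => q.2.foldl (fun d v => d.insert v (d.getD v [] ++ [q.1])) d) init =
      (L.flatMap (fun q => q.2.map (fun v => (v, q.1)))).foldl
        (fun d r => d.insert r.1 (d.getD r.1 [] ++ [r.2])) init := by
  induction L generalizing init with
  | nil => rfl
  | cons q L ih =>
      simp only [List.foldl_cons, List.flatMap_cons, List.foldl_append, ih, List.foldl_map]

theorem pv_filter_fst_singleton {l : List (Int × Int)} (h : (l.map (·.1)).Nodup)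
    {r : Int × Int} (hr : r ∈ l) : l.filter (fun p => p.1 == r.1) = [r] := by
  induction l with
  | nil => cases hr
  | cons a l ih =>
      simp only [List.map_cons, List.nodup_cons] at h
      rcases List.mem_cons.1 hr with rfl | hr'
      · have : l.filter (fun p => p.1 == r.1) = [] := by
          refine List.filter_eq_nil_iff.2 (fun p hp => ?_)
          simp only [beq_iff_eq]
          exact fun e => h.1 (e ▸ List.mem_map_of_mem hp)
        simp [this]
      · have hne : ¬ (a.1 == r.1) = true := by
          simp only [beq_iff_eq]
          exact fun e => h.1 (e ▸ List.mem_map_of_mem hr')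
        simp [hne, ih h.2 hr']

theorem pv_mem_grp {tab_ids : List Int} {n : Nat} {t v : Int}
    (hv : v ∈ pvGrp tab_ids n t) : pvIds tab_ids v = t := by
  rcases List.mem_map.1 hv with ⟨q, hq, rfl⟩
  rcases List.mem_filter.1 hq with ⟨hql, hqt⟩
  rcases List.mem_map.1 hql with ⟨k, _, rfl⟩
  simpa using (beq_iff_eq.1 hqt)

theorem pv_grp_nodup (tab_ids : List Int) (n : Nat) (t : Int) :
    (pvGrp tab_ids n t).Nodup := by
  have h1 : (pvGrp tab_ids n t).Sublist ((pvPl tab_ids n).map (·.2)) :=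
    List.Sublist.map _ List.filter_sublist
  refine h1.nodup ?_
  have h2 : (pvPl tab_ids n).map (·.2) = (List.range n).map (fun (k : Nat) => (k : Int)) := by
    simp [pvPl, List.map_map, Function.comp]
  rw [h2]
  exact List.nodup_range.map (fun a b hab => by exact_mod_cast hab)

theorem pv_fl_fst_nodup (tab_ids : List Int) (n : Nat) :
    ((pvFl tab_ids n).map (·.1)).Nodup := by
  have : (pvFl tab_ids n).map (·.1) = (pvD tab_ids n).flatMap (pvGrp tab_ids n) := by
    simp only [pvFl, List.map_flatMap]
    congr 1
    funext t
    rw [List.map_map]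
    exact List.map_id _
  rw [this, List.nodup_flatMap]
  constructor
  · exact fun t _ => pv_grp_nodup tab_ids n t
  · have hD : (pvD tab_ids n).Nodup := PySem.Set.nodup_ofList _
    refine hD.imp_of_mem (fun {a b} _ _ hab => ?_)
    intro v hva hvb
    exact hab ((pv_mem_grp hva).symm.trans (pv_mem_grp hvb))

-- A's first loop is the grouping fold over pvPl
theorem pv_table_dict_eq (tab_cols tab_ids : List Int) :
    ((PySem.List.enumerate tab_cols).foldl
      (fun d p =>
        d.insert (PySem.List.pyGetD tab_ids p.1 0)
          (d.getD (PySem.List.pyGetD tab_ids p.1 0) [] ++ [p.1]))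
      (PySem.Dict.empty : PySem.Dict Int (List Int))) =
    ((pvPl tab_ids tab_cols.length).foldl
      (fun d q => d.insert q.1 (d.getD q.1 [] ++ [q.2])) PySem.Dict.empty) := by
  calc ((PySem.List.enumerate tab_cols).foldl
      (fun d p =>
        d.insert (PySem.List.pyGetD tab_ids p.1 0)
          (d.getD (PySem.List.pyGetD tab_ids p.1 0) [] ++ [p.1]))
      (PySem.Dict.empty : PySem.Dict Int (List Int)))
      = ((PySem.List.enumerate tab_cols).map (fun p => (pvIds tab_ids p.1, p.1))).foldl
          (fun d q => d.insert q.1 (d.getD q.1 [] ++ [q.2])) PySem.Dict.empty := by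
        rw [List.foldl_map]; rfl
    _ = _ := by
        rw [pv_enum_map tab_cols 0 (fun i => (pvIds tab_ids i, i))]
        simp [pvPl]

theorem pv_TD_keys (tab_ids : List Int) (n : Nat) :
    (((pvPl tab_ids n).foldl
      (fun d q => d.insert q.1 (d.getD q.1 [] ++ [q.2]))
      (PySem.Dict.empty : PySem.Dict Int (List Int)))).keys = pvD tab_ids n :=
  PySem.Dict.keys_foldl_modify_key (pvPl tab_ids n) (fun q => q.1) []
    (fun _ q l => l ++ [q.2]) PySem.Dict.empty

theorem pv_TD_nodup (tab_ids : List Int) (n : Nat) :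
    (((pvPl tab_ids n).foldl
      (fun d q => d.insert q.1 (d.getD q.1 [] ++ [q.2]))
      (PySem.Dict.empty : PySem.Dict Int (List Int)))).keys.Nodup :=
  PySem.Dict.nodup_keys_foldl_modify_key (pvPl tab_ids n) (fun q => q.1) []
    (fun _ q l => l ++ [q.2]) PySem.Dict.empty List.nodup_nil

theorem pv_TD_getD (tab_ids : List Int) (n : Nat) (t : Int) :
    (((pvPl tab_ids n).foldl
      (fun d q => d.insert q.1 (d.getD q.1 [] ++ [q.2]))
      (PySem.Dict.empty : PySem.Dict Int (List Int)))).getD t [] = pvGrp tab_ids n t :=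
  (PySem.Dict.getD_foldl_modify_append (pvPl tab_ids n) PySem.Dict.empty t).trans
    (by simp [pvGrp])

theorem pv_TD_items (tab_ids : List Int) (n : Nat) :
    (((pvPl tab_ids n).foldl
      (fun d q => d.insert q.1 (d.getD q.1 [] ++ [q.2]))
      (PySem.Dict.empty : PySem.Dict Int (List Int)))).items =
      (pvD tab_ids n).map (fun t => (t, pvGrp tab_ids n t)) := by
  rw [PySem.Dict.items_eq_map_keys _ (pv_TD_nodup tab_ids n) [], pv_TD_keys]
  exact List.map_congr_left fun t _ => by rw [pv_TD_getD]

theorem pv_TD_size (tab_ids : List Int) (n : Nat) :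
    (((pvPl tab_ids n).foldl
      (fun d q => d.insert q.1 (d.getD q.1 [] ++ [q.2]))
      (PySem.Dict.empty : PySem.Dict Int (List Int)))).size = (pvD tab_ids n).length := by
  show (((pvPl tab_ids n).foldl
      (fun d q => d.insert q.1 (d.getD q.1 [] ++ [q.2]))
      (PySem.Dict.empty : PySem.Dict Int (List Int)))).items.length = _
  rw [pv_TD_items]
  simp

theorem pv_flA (tab_ids : List Int) (n : Nat) :
    ((pvD tab_ids n).map (fun t => (t, pvGrp tab_ids n t))).flatMap
      (fun q => q.2.map (fun v => (v, q.1))) = pvFl tab_ids n := by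
  simp [pvFl, List.flatMap_map]

theorem pv_CD_keys (tab_ids : List Int) (n : Nat) :
    (((pvFl tab_ids n).foldl
      (fun d r => d.insert r.1 (d.getD r.1 [] ++ [r.2]))
      (PySem.Dict.empty : PySem.Dict Int (List Int)))).keys = (pvFl tab_ids n).map (·.1) := by
  have h1 : (((pvFl tab_ids n).foldl
      (fun d r => d.insert r.1 (d.getD r.1 [] ++ [r.2]))
      (PySem.Dict.empty : PySem.Dict Int (List Int)))).keys =
      PySem.Set.ofList ((pvFl tab_ids n).map (·.1)) :=
    PySem.Dict.keys_foldl_modify_key (pvFl tab_ids n) (fun r => r.1) []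
      (fun _ r l => l ++ [r.2]) PySem.Dict.empty
  rw [h1]
  exact PySem.Set.ofList_eq_self_of_nodup _ (pv_fl_fst_nodup tab_ids n)

theorem pv_CD_nodup (tab_ids : List Int) (n : Nat) :
    (((pvFl tab_ids n).foldl
      (fun d r => d.insert r.1 (d.getD r.1 [] ++ [r.2]))
      (PySem.Dict.empty : PySem.Dict Int (List Int)))).keys.Nodup :=
  PySem.Dict.nodup_keys_foldl_modify_key (pvFl tab_ids n) (fun r => r.1) []
    (fun _ r l => l ++ [r.2]) PySem.Dict.empty List.nodup_nil

theorem pv_CD_getD (tab_ids : List Int) (n : Nat) (v : Int) :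
    (((pvFl tab_ids n).foldl
      (fun d r => d.insert r.1 (d.getD r.1 [] ++ [r.2]))
      (PySem.Dict.empty : PySem.Dict Int (List Int)))).getD v [] =
      ((pvFl tab_ids n).filter (·.1 == v)).map (·.2) :=
  (PySem.Dict.getD_foldl_modify_append (pvFl tab_ids n) PySem.Dict.empty v).trans (by simp)

theorem pv_CD_items (tab_ids : List Int) (n : Nat) :
    (((pvFl tab_ids n).foldl
      (fun d r => d.insert r.1 (d.getD r.1 [] ++ [r.2]))
      (PySem.Dict.empty : PySem.Dict Int (List Int)))).items =
      (pvFl tab_ids n).map (fun r => (r.1, [r.2])) := by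
  rw [PySem.Dict.items_eq_map_keys _ (pv_CD_nodup tab_ids n) [], pv_CD_keys, List.map_map]
  refine List.map_congr_left fun r hr => ?_
  show (r.1, (((pvFl tab_ids n).foldl
      (fun d r => d.insert r.1 (d.getD r.1 [] ++ [r.2]))
      (PySem.Dict.empty : PySem.Dict Int (List Int)))).getD r.1 []) = (r.1, [r.2])
  rw [pv_CD_getD, pv_filter_fst_singleton (pv_fl_fst_nodup tab_ids n) hr]
  rfl

theorem pv_OUT_items (tab_ids : List Int) (n : Nat) :
    ((((pvFl tab_ids n).map (fun r => (r.1, ([r.2] : List Int)))).foldl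
      (fun d p => d.insert p.1 p.2)
      (PySem.Dict.empty : PySem.Dict Int (List Int)))).items =
      (pvFl tab_ids n).map (fun r => (r.1, [r.2])) := by
  have h := PySem.Dict.items_foldl_insert_fresh
    ((pvFl tab_ids n).map (fun r => (r.1, ([r.2] : List Int))))
    (fun p => p.1) (fun p => p.2) PySem.Dict.empty
    (fun a _ => rfl)
    (by simpa [List.map_map] using pv_fl_fst_nodup tab_ids n)
  simpa using h

theorem pv_take (tab_ids : List Int) (n : Nat) (h : n ≤ tab_ids.length) :
    (pvPl tab_ids n).map (·.1) = tab_ids.take n := by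
  apply List.ext_getElem
  · simp [pvPl]; omega
  · intro i h1 h2
    simp only [pvPl, List.map_map, Function.comp, List.getElem_map, List.getElem_range,
      List.getElem_take]
    simp only [pvIds, PySem.List.pyGetD_natCast]
    have h3 : i < n := by simpa [pvPl] using h1
    rw [List.getD_eq_getElem]

theorem pv_distinct (tab_cols tab_ids : List Int) (h : tab_cols.length ≤ tab_ids.length) :
    PySem.List.dedup (PySem.List.slice tab_ids none (some (tab_cols.length : Int))) =
      pvD tab_ids tab_cols.length := by
  rw [PySem.List.slice_to_natCast, PySem.List.dedup_eq_ofList]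
  unfold pvD
  rw [pv_take tab_ids tab_cols.length h]

theorem pv_pairsB (tab_ids : List Int) (n : Nat) :
    (pvD tab_ids n).flatMap (fun t =>
        ((PySem.List.pyRange 0 (n : Int) 1).filter (fun i => PySem.List.pyGetD tab_ids i 0 == t)).map
          (fun i => (i, ([t] : List Int)))) =
      (pvFl tab_ids n).map (fun r => (r.1, [r.2])) := by
  simp only [pvFl, List.map_flatMap]
  congr 1
  funext t
  rw [PySem.List.pyRange_zero_nat]
  simp only [pvGrp, pvPl, pvIds, List.filter_map, List.map_map]
  rfl

theorem pv_main (tab_cols tab_ids : List Int)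
    (h : tab_cols.length ≤ tab_ids.length) :
    get_reprocess_col_table_dict tab_cols tab_ids =
      get_reprocess_col_table_dict_alt tab_cols tab_ids := by
  simp only [get_reprocess_col_table_dict, get_reprocess_col_table_dict_alt,
    PySem.List.len_eq]
  rw [pv_table_dict_eq tab_cols tab_ids, pv_nested_flatten, pv_TD_items, pv_flA,
    pv_TD_size, pv_distinct tab_cols tab_ids h, pv_pairsB]
  have hd : (((pvFl tab_ids tab_cols.length).foldl
      (fun d r => d.insert r.1 (d.getD r.1 [] ++ [r.2]))
      (PySem.Dict.empty : PySem.Dict Int (List Int)))) =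
      ((((pvFl tab_ids tab_cols.length).map (fun r => (r.1, ([r.2] : List Int)))).foldl
      (fun d p => d.insert p.1 p.2)
      (PySem.Dict.empty : PySem.Dict Int (List Int)))) :=
    PySem.Dict.ext ((pv_CD_items tab_ids tab_cols.length).trans
      (pv_OUT_items tab_ids tab_cols.length).symm)
  rw [hd]

-- ===== VERDICT (by name: the statement is the Claim_ definition above) =====
theorem get_reprocess_col_table_dict_spec : Claim_equal_get_reprocess_col_table_dict := by
  intro tab_cols tab_ids _ hpre
  exact pv_main tab_cols tab_ids hpre
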